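-- pv_equiv track=rewrite | github.com/lurenxing628/---- | .limcode/skills/aps-post-change-check/scripts/post_change_check.py | check_linkage_reminders
-- ===== SOURCE A (Python) =====
-- def check_linkage_reminders(changed_files):
--     """根据改动文件类型生成联动更新提醒。"""
--     reminders = []
--     has_route = any(f.replace("\\", "/").startswith("web/routes/") and f.endswith(".py") for f in changed_files)
--     has_schema = any("schema.sql" in f or "migrations/" in f.replace("\\", "/") for f in changed_files)
--     has_scheduler = any(f.replace("\\", "/").startswith("core/services/scheduler/") for f in changed_files)
--     has_excel = any("excel" in f.lower() and f.endswith(".py") for f in changed_files)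
--     has_template = any(f.replace("\\", "/").startswith("templates/") and f.endswith(".html") for f in changed_files)
--
--     if has_route:
--         reminders.append("改了 route → 检查对应 template 是否需要同步；检查 面板与接口清单.md")
--     if has_schema:
--         reminders.append("改了 schema/migration → 必须更新：开发文档数据模型章节 + 速查表字段字典")
--     if has_scheduler:
--         reminders.append("改了 scheduler 服务 → 检查速查表 ScheduleConfig 部分是否需要更新")
--     if has_excel:
--         reminders.append("改了 Excel 相关代码 → 检查速查表 Excel 模板清单是否需要更新")
--     if has_template:
--         reminders.append("改了 template → 检查 面板与接口清单.md 是否需要更新")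
--     return reminders
-- ===== SOURCE B (Python) =====
-- def check_linkage_reminders(changed_files):
--     """根据改动文件类型生成联动更新提醒。"""
--     has_route = has_schema = has_scheduler = has_excel = has_template = False
--     for f in changed_files:
--         n = f.replace("\\", "/")
--         has_route = has_route or (n.startswith("web/routes/") and f.endswith(".py"))
--         has_schema = has_schema or ("schema.sql" in f) or ("migrations/" in n)
--         has_scheduler = has_scheduler or n.startswith("core/services/scheduler/")
--         has_excel = has_excel or ("excel" in f.lower() and f.endswith(".py"))
--         has_template = has_template or (n.startswith("templates/") and f.endswith(".html"))
--     reminders = []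
--     if has_route:
--         reminders.append("改了 route → 检查对应 template 是否需要同步；检查 面板与接口清单.md")
--     if has_schema:
--         reminders.append("改了 schema/migration → 必须更新：开发文档数据模型章节 + 速查表字段字典")
--     if has_scheduler:
--         reminders.append("改了 scheduler 服务 → 检查速查表 ScheduleConfig 部分是否需要更新")
--     if has_excel:
--         reminders.append("改了 Excel 相关代码 → 检查速查表 Excel 模板清单是否需要更新")
--     if has_template:
--         reminders.append("改了 template → 检查 面板与接口清单.md 是否需要更新")
--     return reminders
-- ===== Notes on version B (the rewrite author's own statement) =====
-- stated objective: alternative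
-- what changed: Replaces five separate any() scans over the file list with a single fold that accumulates all five boolean flags in one pass, computing the backslash normalization once per file instead of thrice.
import Mathlib
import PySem

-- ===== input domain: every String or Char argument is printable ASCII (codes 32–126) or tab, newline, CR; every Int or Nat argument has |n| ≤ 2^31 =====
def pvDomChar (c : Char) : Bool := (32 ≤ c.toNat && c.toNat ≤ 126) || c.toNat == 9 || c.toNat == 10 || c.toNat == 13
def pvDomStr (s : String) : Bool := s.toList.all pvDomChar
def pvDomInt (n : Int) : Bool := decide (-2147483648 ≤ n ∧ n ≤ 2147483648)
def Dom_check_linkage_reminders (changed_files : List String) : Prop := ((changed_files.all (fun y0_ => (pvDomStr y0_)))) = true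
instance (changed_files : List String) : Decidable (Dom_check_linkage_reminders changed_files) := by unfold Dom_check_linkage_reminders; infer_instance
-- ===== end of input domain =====

-- B fuses A's five separate any() scans into one accumulating pass over the list (same cost class; a different decomposition).

-- ===== PORT A =====
def check_linkage_reminders (changed_files : List String) : List String :=
  let has_route := changed_files.any (fun f =>
    PySem.Str.startswith (PySem.Str.replace f "\\" "/") "web/routes/" && PySem.Str.endswith f ".py")
  let has_schema := changed_files.any (fun f =>
    PySem.Str.isIn "schema.sql" f || PySem.Str.isIn "migrations/" (PySem.Str.replace f "\\" "/"))
  let has_scheduler := changed_files.any (fun f =>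
    PySem.Str.startswith (PySem.Str.replace f "\\" "/") "core/services/scheduler/")
  let has_excel := changed_files.any (fun f =>
    PySem.Str.isIn "excel" (PySem.Str.lower f) && PySem.Str.endswith f ".py")
  let has_template := changed_files.any (fun f =>
    PySem.Str.startswith (PySem.Str.replace f "\\" "/") "templates/" && PySem.Str.endswith f ".html")
  let reminders : List String := []
  let reminders := if has_route then reminders ++ ["改了 route → 检查对应 template 是否需要同步；检查 面板与接口清单.md"] else reminders
  let reminders := if has_schema then reminders ++ ["改了 schema/migration → 必须更新：开发文档数据模型章节 + 速查表字段字典"] else reminders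
  let reminders := if has_scheduler then reminders ++ ["改了 scheduler 服务 → 检查速查表 ScheduleConfig 部分是否需要更新"] else reminders
  let reminders := if has_excel then reminders ++ ["改了 Excel 相关代码 → 检查速查表 Excel 模板清单是否需要更新"] else reminders
  let reminders := if has_template then reminders ++ ["改了 template → 检查 面板与接口清单.md 是否需要更新"] else reminders
  reminders

-- ===== PORT B =====
def check_linkage_reminders_alt (changed_files : List String) : List String :=
  let flags := changed_files.foldl (fun (st : Bool × Bool × Bool × Bool × Bool) f =>
    let n := PySem.Str.replace f "\\" "/"
    ( st.1 || (PySem.Str.startswith n "web/routes/" && PySem.Str.endswith f ".py"),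
      st.2.1 || PySem.Str.isIn "schema.sql" f || PySem.Str.isIn "migrations/" n,
      st.2.2.1 || PySem.Str.startswith n "core/services/scheduler/",
      st.2.2.2.1 || (PySem.Str.isIn "excel" (PySem.Str.lower f) && PySem.Str.endswith f ".py"),
      st.2.2.2.2 || (PySem.Str.startswith n "templates/" && PySem.Str.endswith f ".html") ))
    (false, false, false, false, false)
  let reminders : List String := []
  let reminders := if flags.1 then reminders ++ ["改了 route → 检查对应 template 是否需要同步；检查 面板与接口清单.md"] else reminders
  let reminders := if flags.2.1 then reminders ++ ["改了 schema/migration → 必须更新：开发文档数据模型章节 + 速查表字段字典"] else reminders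
  let reminders := if flags.2.2.1 then reminders ++ ["改了 scheduler 服务 → 检查速查表 ScheduleConfig 部分是否需要更新"] else reminders
  let reminders := if flags.2.2.2.1 then reminders ++ ["改了 Excel 相关代码 → 检查速查表 Excel 模板清单是否需要更新"] else reminders
  let reminders := if flags.2.2.2.2 then reminders ++ ["改了 template → 检查 面板与接口清单.md 是否需要更新"] else reminders
  reminders

-- ===== PRECONDITION & SPEC =====
def Spec_check_linkage_reminders (changed_files : List String) (out : List String) : Prop := out = check_linkage_reminders_alt changed_files
instance (changed_files : List String) (out : List String) : Decidable (Spec_check_linkage_reminders changed_files out) := by unfold Spec_check_linkage_reminders; infer_instance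

-- ===== CLAIM (what is proved, stated in full; the proofs are below) =====
def Claim_equal_check_linkage_reminders : Prop := ∀ (changed_files : List String), Dom_check_linkage_reminders changed_files → Spec_check_linkage_reminders changed_files (check_linkage_reminders changed_files)

-- ===== LEMMAS AND PROOFS =====

-- The fused fold computes exactly the five any-scans, ORed onto the initial state.
theorem fold5_eq_any (xs : List String) (s : Bool × Bool × Bool × Bool × Bool) :
    xs.foldl (fun (st : Bool × Bool × Bool × Bool × Bool) f =>
      let n := PySem.Str.replace f "\\" "/"
      ( st.1 || (PySem.Str.startswith n "web/routes/" && PySem.Str.endswith f ".py"),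
        st.2.1 || PySem.Str.isIn "schema.sql" f || PySem.Str.isIn "migrations/" n,
        st.2.2.1 || PySem.Str.startswith n "core/services/scheduler/",
        st.2.2.2.1 || (PySem.Str.isIn "excel" (PySem.Str.lower f) && PySem.Str.endswith f ".py"),
        st.2.2.2.2 || (PySem.Str.startswith n "templates/" && PySem.Str.endswith f ".html") )) s
    = ( s.1 || xs.any (fun f => PySem.Str.startswith (PySem.Str.replace f "\\" "/") "web/routes/" && PySem.Str.endswith f ".py"),
        s.2.1 || xs.any (fun f => PySem.Str.isIn "schema.sql" f || PySem.Str.isIn "migrations/" (PySem.Str.replace f "\\" "/")),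
        s.2.2.1 || xs.any (fun f => PySem.Str.startswith (PySem.Str.replace f "\\" "/") "core/services/scheduler/"),
        s.2.2.2.1 || xs.any (fun f => PySem.Str.isIn "excel" (PySem.Str.lower f) && PySem.Str.endswith f ".py"),
        s.2.2.2.2 || xs.any (fun f => PySem.Str.startswith (PySem.Str.replace f "\\" "/") "templates/" && PySem.Str.endswith f ".html") ) := by
  induction xs generalizing s with
  | nil => simp
  | cons x xs ih =>
    obtain ⟨a, b, c, d, e⟩ := s
    simp only [List.foldl]
    rw [ih]
    simp [Bool.or_assoc]

-- ===== VERDICT (by name: the statement is the Claim_ definition above) =====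
theorem check_linkage_reminders_spec : Claim_equal_check_linkage_reminders := by
  intro xs _
  unfold Spec_check_linkage_reminders check_linkage_reminders check_linkage_reminders_alt
  rw [fold5_eq_any]
  simp
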